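-- pv_equiv track=rewrite | github.com/fluree/db | testsuite-sparql/scripts/analyze_report.py | extract_category
-- ===== SOURCE A (Python) =====
-- def extract_category(test_id):
--     """Extract the W3C test category from a test ID URL."""
--     parts = test_id.split("/")
--     # SPARQL 1.1: .../data-sparql11/<category>/manifest#...
--     for i, p in enumerate(parts):
--         if p == "data-sparql11" and i + 1 < len(parts):
--             return parts[i + 1]
--     # SPARQL 1.0: .../data-r2/<category>/manifest#...
--     for i, p in enumerate(parts):
--         if p == "data-r2" and i + 1 < len(parts):
--             return parts[i + 1]
--     return "unknown"
-- ===== SOURCE B (Python) =====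
-- def extract_category(test_id):
--     """Extract the W3C test category from a test ID URL."""
--     parts = test_id.split("/")
--     # successor map: each segment -> segment that follows it (first occurrence wins;
--     # a segment in final position has no successor and is never recorded)
--     nxt = {}
--     for k, v in zip(parts, parts[1:]):
--         nxt.setdefault(k, v)
--     for marker in ("data-sparql11", "data-r2"):
--         if marker in nxt:
--             return nxt[marker]
--     return "unknown"
-- ===== Notes on version B (the rewrite author's own statement) =====
-- stated objective: alternative
-- what changed: Replaces A's two repeated enumerate-and-index scans of the split segments with a single pass that builds a successor map (segment -> following segment, first occurrence wins via setdefault, last segment excluded) followed by two dictionary lookups in priority order.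
import Mathlib
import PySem

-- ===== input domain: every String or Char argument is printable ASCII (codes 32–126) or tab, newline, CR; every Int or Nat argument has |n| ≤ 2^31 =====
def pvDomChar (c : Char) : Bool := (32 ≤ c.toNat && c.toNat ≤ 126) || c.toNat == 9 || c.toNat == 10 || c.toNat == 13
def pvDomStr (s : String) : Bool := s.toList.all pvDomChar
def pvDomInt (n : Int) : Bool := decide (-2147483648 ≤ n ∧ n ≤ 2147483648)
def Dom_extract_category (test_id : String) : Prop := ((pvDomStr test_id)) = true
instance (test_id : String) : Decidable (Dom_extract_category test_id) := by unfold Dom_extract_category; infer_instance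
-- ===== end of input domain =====

-- B replaces A's two repeated marker scans with a single successor map built once
-- (first occurrence wins) followed by two lookups; objective: alternative, not faster.

-- ===== PORT A =====
-- the 'for i, p in enumerate(parts): if p == marker and i + 1 < len(parts): return parts[i+1]' loop
def findA (parts : List String) (marker : String) : List (Int × String) → Option String
  | [] => none
  | (i, p) :: rest =>
    if p = marker ∧ i + 1 < (parts.length : Int) then PySem.List.pyGet? parts (i + 1)
    else findA parts marker rest

def extract_category (test_id : String) : String :=
  let parts := (PySem.Str.split? test_id "/").getD []
  match findA parts "data-sparql11" (PySem.List.enumerate parts) with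
  | some v => v
  | none =>
    match findA parts "data-r2" (PySem.List.enumerate parts) with
    | some v => v
    | none => "unknown"

-- ===== PORT B =====
-- the 'for marker in (...): if marker in nxt: return nxt[marker]' loop
def pickB (nxt : PySem.Dict String String) : List String → String
  | [] => "unknown"
  | m :: rest =>
    match nxt.get? m with
    | some v => v
    | none => pickB nxt rest

def extract_category_alt (test_id : String) : String :=
  let parts := (PySem.Str.split? test_id "/").getD []
  let nxt := (parts.zip (PySem.List.slice parts (some 1) none)).foldl
      (fun d p => d.setdefault p.1 p.2) PySem.Dict.empty
  pickB nxt ["data-sparql11", "data-r2"]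

-- ===== PRECONDITION & SPEC =====
def Spec_extract_category (test_id : String) (out : String) : Prop := out = extract_category_alt test_id
instance (test_id : String) (out : String) : Decidable (Spec_extract_category test_id out) := by unfold Spec_extract_category; infer_instance

-- ===== CLAIM (what is proved, stated in full; the proofs are below) =====
def Claim_equal_extract_category : Prop := ∀ (test_id : String), Dom_extract_category test_id → Spec_extract_category test_id (extract_category test_id)

-- ===== LEMMAS AND PROOFS =====

-- the setdefault-fold dict answers lookups like a first-match scan of the pair list
lemma get?_setdefault_fold (pairs : List (String × String)) (d : PySem.Dict String String)
    (k : String) :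
    (pairs.foldl (fun d p => d.setdefault p.1 p.2) d).get? k =
      (d.get? k).or ((pairs.find? (fun p => p.1 == k)).map (·.2)) := by
  induction pairs generalizing d with
  | nil => simp
  | cons hd tl ih =>
    obtain ⟨a, b⟩ := hd
    simp only [List.foldl_cons, ih]
    by_cases hk : k = a
    · subst hk
      rw [PySem.Dict.get?_setdefault_self]
      rw [show List.find? (fun p => p.1 == k) ((k, b) :: tl) = some (k, b) from List.find?_cons_of_pos (by simp)]
      cases h : d.get? k <;> simp
    · rw [PySem.Dict.get?_setdefault_of_ne _ _ hk]
      have : ((a, b).1 == k) = false := by simp [Ne.symm hk]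
      rw [List.find?_cons_of_neg (by simp [this])]

-- A's enumerate scan, started at offset j on the suffix s = parts.drop j,
-- is the first-match scan of the successor pairs of that suffix
lemma findA_eq_find? (s : List String) : ∀ (parts : List String) (j : Nat) (marker : String),
    parts.drop j = s →
    findA parts marker (PySem.List.enumerate s (j : Int)) =
      ((s.zip (parts.drop (j + 1))).find? (fun p => p.1 == marker)).map (·.2) := by
  induction s with
  | nil => intro parts j marker _; simp [findA, PySem.List.enumerate_nil]
  | cons a s' ih =>
    intro parts j marker hs
    have hdrop1 : parts.drop (j + 1) = s' := by
      rw [← List.tail_drop, hs]; rfl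
    have hlen : parts.length - j = s'.length + 1 := by
      have := congrArg List.length hs
      simpa using this
    have hjlt : j < parts.length := by omega
    rw [PySem.List.enumerate_cons]
    simp only [findA, hdrop1]
    by_cases hm : a = marker
    · subst hm
      cases s' with
      | nil =>
        have hcond : ¬((j : Int) + 1 < (parts.length : Int)) := by
          simp at hlen ⊢; omega
        simp [hcond, findA, PySem.List.enumerate_nil]
      | cons b s'' =>
        have hcond : (j : Int) + 1 < (parts.length : Int) := by
          simp at hlen ⊢; omega
        have hget : PySem.List.pyGet? parts ((j : Int) + 1) = some b := by
          have : ((j : Int) + 1) = ((j + 1 : Nat) : Int) := by push_cast; ring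
          rw [this, PySem.List.pyGet?_natCast]
          rw [← List.head?_drop, hdrop1]; rfl
        simp [hcond, hget, List.find?_cons_of_pos]
    · have hcond : ¬(a = marker ∧ (j : Int) + 1 < (parts.length : Int)) := by
        intro h; exact hm h.1
      rw [if_neg hcond]
      have hfail : ((a, (parts.drop (j+1)).head?.getD "").1 == marker) = false := by
        simp [hm]
      cases s' with
      | nil => simp [findA, PySem.List.enumerate_nil]
      | cons b s'' =>
        have hdrop2 : parts.drop (j + 1 + 1) = s'' := by
          rw [← List.tail_drop, hdrop1]; rfl
        have := ih parts (j + 1) marker hdrop1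
        rw [hdrop2] at this
        have hcast : ((j : Int) + 1) = ((j + 1 : Nat) : Int) := by push_cast; ring
        rw [hcast, this]
        simp [List.find?_cons_of_neg, hm]

lemma slice_one_eq_tail (xs : List String) :
    PySem.List.slice xs (some 1) none = xs.tail := PySem.List.slice_from_one xs

-- ===== VERDICT (by name: the statement is the Claim_ definition above) =====
theorem extract_category_spec : Claim_equal_extract_category := by
  intro test_id _
  unfold Spec_extract_category extract_category extract_category_alt
  set parts := (PySem.Str.split? test_id "/").getD [] with hp
  have key : ∀ marker,
      findA parts marker (PySem.List.enumerate parts) =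
        ((parts.zip (PySem.List.slice parts (some 1) none)).foldl
          (fun d p => d.setdefault p.1 p.2) PySem.Dict.empty).get? marker := by
    intro marker
    rw [get?_setdefault_fold, PySem.Dict.get?_empty, Option.none_or, slice_one_eq_tail]
    have := findA_eq_find? parts parts 0 marker (by simp)
    simpa [PySem.List.enumerate] using this
  simp only [pickB, ← key]
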